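-- pv_equiv track=rewrite | github.com/elafontaine/Euler_project | Problem11.py | finding_the_x_highest_adjacent_number
-- ===== SOURCE A (Python) =====
-- import functools
-- import operator
-- import operator as operator
--
-- def finding_the_x_highest_adjacent_number_0_degree(number, grid_array):
--     current_array = [1 for x in range(number)]
--     for index_row in range(len(grid_array)):
--         for index_column in range(len(grid_array) - number + 1):
--             accumulator = 1
--             for index in range(number):
--                 accumulator *= grid_array[index_row][index_column + index]
--             if accumulator > functools.reduce(operator.mul, current_array):
--                 for index2 in range(number):
--                     current_array[index2] = grid_array[index_row][index_column + index2]
--     return current_array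
--
-- def finding_the_x_highest_adjacent_number_90_degree(number, grid_array):
--     current_array = [1 for x in range(number)]
--     for index_row in range(len(grid_array) - number + 1):
--         for index_column in range(len(grid_array)):
--             accumulator = 1
--             for index in range(number):
--                 accumulator *= grid_array[index_row + index][index_column]
--             if accumulator > functools.reduce(operator.mul, current_array):
--                 for index2 in range(number):
--                     current_array[index2] = grid_array[index_row + index2][index_column]
--     return current_array
--
-- def finding_the_x_highest_adjacent_number_45_degree(number, grid_array):
--     current_array = [1 for x in range(number)]
--     for index_row in range(len(grid_array) - number + 1):
--         for index_column in range(len(grid_array) - number + 1):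
--             accumulator = 1
--             for index in range(number):
--                 accumulator *= grid_array[index_row + index][index_column + index]
--             if accumulator > functools.reduce(operator.mul, current_array):
--                 for index2 in range(number):
--                     current_array[index2] = grid_array[index_row + index2][index_column + index2]
--     return current_array
--
-- def finding_the_x_highest_adjacent_number_135_degree(number, grid_array):
--     current_array = [1 for x in range(number)]
--     for index_row in range(len(grid_array) - number + 1):
--         for index_column in range(number-1,len(grid_array) - number + 1):
--             accumulator = 1
--             for index in range(number):
--                 accumulator *= grid_array[index_row + index][index_column - index]
--             if accumulator > functools.reduce(operator.mul, current_array):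
--                 for index2 in range(number):
--                     current_array[index2] = grid_array[index_row + index2][index_column - index2]
--     return current_array
--
-- def finding_the_x_highest_adjacent_number(number, grid_array):
--
--     _0_degree = finding_the_x_highest_adjacent_number_0_degree(number, grid_array)
--     _45_degree = finding_the_x_highest_adjacent_number_45_degree(number, grid_array)
--     _90_degree = finding_the_x_highest_adjacent_number_90_degree(number, grid_array)
--     _135_degree = finding_the_x_highest_adjacent_number_135_degree(number, grid_array)
--     list = [_0_degree,_45_degree,_90_degree,_135_degree]
--     multiplication_result = [functools.reduce(operator.mul,x) for x in list]
--     for i,element in enumerate(list):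
--         if max(multiplication_result) == multiplication_result[i]:
--             return element
-- ===== SOURCE B (Python) =====
-- def _window_products(values, k):
--     """Products of every k-window of values, maintained incrementally with a
--     zero counter and the running product of the window's nonzero entries."""
--     out = []
--     zeros = 0
--     nonzero_prod = 1
--     for j, x in enumerate(values):
--         if x == 0:
--             zeros += 1
--         else:
--             nonzero_prod *= x
--         if j >= k:
--             y = values[j - k]
--             if y == 0:
--                 zeros -= 1
--             else:
--                 nonzero_prod //= y
--         if j >= k - 1:
--             out.append(nonzero_prod if zeros == 0 else 0)
--     return out
--
--
-- def _best(positions, prod_at, window_at, k):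
--     """First window (in the given scan order) whose product strictly beats all
--     earlier ones and the all-ones baseline; returns (product, window)."""
--     bp, bpos = 1, None
--     for r, c in positions:
--         p = prod_at(r, c)
--         if bp < p:
--             bp, bpos = p, (r, c)
--     return (bp, [1] * k if bpos is None else window_at(bpos))
--
--
-- def _best_0(k, g):
--     n = len(g)
--     rows = [_window_products(g[r][:n], k) for r in range(n)]
--     return _best(((r, c) for r in range(n) for c in range(n - k + 1)),
--                  lambda r, c: rows[r][c],
--                  lambda rc: [g[rc[0]][rc[1] + i] for i in range(k)], k)
--
--
-- def _best_45(k, g):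
--     n = len(g)
--     dpos = [_window_products([g[i][i + t] for i in range(n - t)], k) for t in range(n)]
--     dneg = [_window_products([g[j][j - t] for j in range(t, n)], k) for t in range(n)]
--     return _best(((r, c) for r in range(n - k + 1) for c in range(n - k + 1)),
--                  lambda r, c: dpos[c - r][r] if r <= c else dneg[r - c][c],
--                  lambda rc: [g[rc[0] + i][rc[1] + i] for i in range(k)], k)
--
--
-- def _best_90(k, g):
--     n = len(g)
--     cols = [_window_products([g[r][c] for r in range(n)], k) for c in range(n)]
--     return _best(((r, c) for r in range(n - k + 1) for c in range(n)),
--                  lambda r, c: cols[c][r],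
--                  lambda rc: [g[rc[0] + i][rc[1]] for i in range(k)], k)
--
--
-- def _best_135(k, g):
--     n = len(g)
--     anti = [_window_products([g[j][s - j] for j in range(max(0, s - n + 1), min(n, s + 1))], k)
--             for s in range(2 * n - 1)]
--     return _best(((r, c) for r in range(n - k + 1) for c in range(k - 1, n - k + 1)),
--                  lambda r, c: anti[r + c][r - max(0, r + c - n + 1)],
--                  lambda rc: [g[rc[0] + i][rc[1] - i] for i in range(k)], k)
--
--
-- def finding_the_x_highest_adjacent_number(number, grid_array):
--     n = len(grid_array)
--     if n - number + 1 <= 0: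
--         return [1] * number
--     b0 = _best_0(number, grid_array)
--     b45 = _best_45(number, grid_array)
--     b90 = _best_90(number, grid_array)
--     b135 = _best_135(number, grid_array)
--     m = max(max(max(b0[0], b45[0]), b90[0]), b135[0])
--     if b0[0] == m:
--         return b0[1]
--     if b45[0] == m:
--         return b45[1]
--     if b90[0] == m:
--         return b90[1]
--     return b135[1]
-- ===== Notes on version B (the rewrite author's own statement) =====
-- stated objective: faster
-- what changed: B replaces A's recompute-each-window scans (every window's product multiplied out from scratch, and the running best re-reduced per window) by one incremental sliding-window sweep per grid line (zero counter + running product of nonzero entries, removing the outgoing cell by exact division), cached in per-direction product tables that a position scan only looks up, reconstructing the winning window from its position.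
import Mathlib
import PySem

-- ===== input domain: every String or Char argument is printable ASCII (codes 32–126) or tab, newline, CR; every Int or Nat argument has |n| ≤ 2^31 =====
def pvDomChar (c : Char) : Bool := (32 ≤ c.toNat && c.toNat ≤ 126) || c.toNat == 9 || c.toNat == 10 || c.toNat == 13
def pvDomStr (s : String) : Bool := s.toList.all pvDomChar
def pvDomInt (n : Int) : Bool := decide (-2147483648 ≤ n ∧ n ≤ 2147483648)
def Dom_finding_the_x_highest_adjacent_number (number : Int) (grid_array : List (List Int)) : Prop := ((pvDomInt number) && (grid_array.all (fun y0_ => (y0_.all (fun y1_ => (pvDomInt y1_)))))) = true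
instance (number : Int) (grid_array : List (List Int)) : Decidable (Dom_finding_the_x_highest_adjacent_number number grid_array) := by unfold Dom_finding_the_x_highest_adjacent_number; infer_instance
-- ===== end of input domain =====

-- B replaces A's four O(N^2 * k) recompute-every-window scans by one O(N^2) sliding sweep per
-- line (zero counter + running product of the window's nonzero entries), cached in per-direction
-- tables that the best-window scan only looks up; objective: faster (asymptotic in k).
-- Both programs scan exactly the same windows (including A's truncated 135-degree column range,
-- taken here as the window set this function defines).

-- ===== PORT A =====

-- 'for i,element in enumerate(list): if max(...) == multiplication_result[i]: return element';
-- falling off the end is Python's implicit 'return None', unreachable (the maximum is attained)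
def pvPick (m : Int) (mult : List Int) (pairs : List (Int × List Int)) : List Int :=
  match pairs with
  | [] => []
  | (i, el) :: rest => if m == PySem.List.pyGetD mult i 0 then el else pvPick m mult rest

-- grid_array[r][c]; both indices are in range on Pre_ inputs (defaults never read there)
def pvGet2 (g : List (List Int)) (r c : Int) : Int :=
  PySem.List.pyGetD (PySem.List.pyGetD g r []) c 0

-- functools.reduce(operator.mul, xs); the [] case is unreachable under Pre_ (Python raises TypeError)
def pvReduceMul (xs : List Int) : Int :=
  match xs with
  | [] => 1
  | h :: t => t.foldl (· * ·) h

def pvDir0 (number : Int) (g : List (List Int)) : List Int :=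
  (PySem.List.pyRange 0 (g.length : Int) 1).foldl (fun cur r =>
    (PySem.List.pyRange 0 ((g.length : Int) - number + 1) 1).foldl (fun cur c =>
      if ((PySem.List.pyRange 0 number 1).foldl (fun a i => a * pvGet2 g r (c + i)) 1) >
          pvReduceMul cur then
        (PySem.List.pyRange 0 number 1).map (fun i => pvGet2 g r (c + i))
      else cur) cur)
    ((PySem.List.pyRange 0 number 1).map (fun _ => (1 : Int)))

def pvDir90 (number : Int) (g : List (List Int)) : List Int :=
  (PySem.List.pyRange 0 ((g.length : Int) - number + 1) 1).foldl (fun cur r =>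
    (PySem.List.pyRange 0 (g.length : Int) 1).foldl (fun cur c =>
      if ((PySem.List.pyRange 0 number 1).foldl (fun a i => a * pvGet2 g (r + i) c) 1) >
          pvReduceMul cur then
        (PySem.List.pyRange 0 number 1).map (fun i => pvGet2 g (r + i) c)
      else cur) cur)
    ((PySem.List.pyRange 0 number 1).map (fun _ => (1 : Int)))

def pvDir45 (number : Int) (g : List (List Int)) : List Int :=
  (PySem.List.pyRange 0 ((g.length : Int) - number + 1) 1).foldl (fun cur r =>
    (PySem.List.pyRange 0 ((g.length : Int) - number + 1) 1).foldl (fun cur c =>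
      if ((PySem.List.pyRange 0 number 1).foldl (fun a i => a * pvGet2 g (r + i) (c + i)) 1) >
          pvReduceMul cur then
        (PySem.List.pyRange 0 number 1).map (fun i => pvGet2 g (r + i) (c + i))
      else cur) cur)
    ((PySem.List.pyRange 0 number 1).map (fun _ => (1 : Int)))

def pvDir135 (number : Int) (g : List (List Int)) : List Int :=
  (PySem.List.pyRange 0 ((g.length : Int) - number + 1) 1).foldl (fun cur r =>
    (PySem.List.pyRange (number - 1) ((g.length : Int) - number + 1) 1).foldl (fun cur c =>
      if ((PySem.List.pyRange 0 number 1).foldl (fun a i => a * pvGet2 g (r + i) (c - i)) 1) >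
          pvReduceMul cur then
        (PySem.List.pyRange 0 number 1).map (fun i => pvGet2 g (r + i) (c - i))
      else cur) cur)
    ((PySem.List.pyRange 0 number 1).map (fun _ => (1 : Int)))

def finding_the_x_highest_adjacent_number (number : Int) (grid_array : List (List Int)) : List Int :=
  let l0 := pvDir0 number grid_array
  let l45 := pvDir45 number grid_array
  let l90 := pvDir90 number grid_array
  let l135 := pvDir135 number grid_array
  let lst := [l0, l45, l90, l135]
  let mult := lst.map pvReduceMul
  -- max(multiplication_result): the [] case is unreachable (lst has four elements)
  let m := match mult with
    | [] => (0 : Int)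
    | h :: t => t.foldl max h
  pvPick m mult (PySem.List.enumerate lst 0)

-- ===== PORT B =====

-- _window_products's 'for j, x in enumerate(values)' loop, as structural recursion on the rest
def pvWPLoop (values : List Int) (k : Int) (rest : List Int) (j : Int)
    (out : List Int) (zeros nzp : Int) : List Int :=
  match rest with
  | [] => out
  | x :: rest' =>
    let zeros1 := if x = 0 then zeros + 1 else zeros
    let nzp1 := if x = 0 then nzp else nzp * x
    let y := PySem.List.pyGetD values (j - k) 0
    let zeros2 := if k ≤ j then (if y = 0 then zeros1 - 1 else zeros1) else zeros1
    let nzp2 := if k ≤ j then (if y = 0 then nzp1 else PySem.Int.floordiv nzp1 y) else nzp1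
    let out2 := if k - 1 ≤ j then out ++ [if zeros2 = 0 then nzp2 else 0] else out
    pvWPLoop values k rest' (j + 1) out2 zeros2 nzp2

-- port of _window_products
def pvWinProds (values : List Int) (k : Int) : List Int :=
  pvWPLoop values k values 0 [] 0 1

-- table[i][j]
def pvLook2 (table : List (List Int)) (i j : Int) : Int :=
  PySem.List.pyGetD (PySem.List.pyGetD table i []) j 0

-- port of _best
def pvBest (positions : List (Int × Int)) (prodAt : Int → Int → Int)
    (windowAt : Int × Int → List Int) (k : Int) : Int × List Int :=
  let acc := positions.foldl (fun acc rc =>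
      if acc.1 < prodAt rc.1 rc.2 then (prodAt rc.1 rc.2, some rc) else acc)
    ((1 : Int), (none : Option (Int × Int)))
  (acc.1, match acc.2 with
          | none => List.replicate k.toNat 1
          | some rc => windowAt rc)

-- port of _best_0
def pvBest0 (k : Int) (g : List (List Int)) : Int × List Int :=
  let n : Int := (g.length : Int)
  let rows := (PySem.List.pyRange 0 n 1).map (fun r =>
    pvWinProds (PySem.List.slice (PySem.List.pyGetD g r []) none (some n)) k)
  pvBest ((PySem.List.pyRange 0 n 1).flatMap (fun r =>
      (PySem.List.pyRange 0 (n - k + 1) 1).map (fun c => (r, c))))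
    (fun r c => pvLook2 rows r c)
    (fun rc => (PySem.List.pyRange 0 k 1).map (fun i => pvGet2 g rc.1 (rc.2 + i))) k

-- port of _best_45
def pvBest45 (k : Int) (g : List (List Int)) : Int × List Int :=
  let n : Int := (g.length : Int)
  let dpos := (PySem.List.pyRange 0 n 1).map (fun t =>
    pvWinProds ((PySem.List.pyRange 0 (n - t) 1).map (fun i => pvGet2 g i (i + t))) k)
  let dneg := (PySem.List.pyRange 0 n 1).map (fun t =>
    pvWinProds ((PySem.List.pyRange t n 1).map (fun j => pvGet2 g j (j - t))) k)
  pvBest ((PySem.List.pyRange 0 (n - k + 1) 1).flatMap (fun r =>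
      (PySem.List.pyRange 0 (n - k + 1) 1).map (fun c => (r, c))))
    (fun r c => if r ≤ c then pvLook2 dpos (c - r) r else pvLook2 dneg (r - c) c)
    (fun rc => (PySem.List.pyRange 0 k 1).map (fun i => pvGet2 g (rc.1 + i) (rc.2 + i))) k

-- port of _best_90
def pvBest90 (k : Int) (g : List (List Int)) : Int × List Int :=
  let n : Int := (g.length : Int)
  let cols := (PySem.List.pyRange 0 n 1).map (fun c =>
    pvWinProds ((PySem.List.pyRange 0 n 1).map (fun r => pvGet2 g r c)) k)
  pvBest ((PySem.List.pyRange 0 (n - k + 1) 1).flatMap (fun r =>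
      (PySem.List.pyRange 0 n 1).map (fun c => (r, c))))
    (fun r c => pvLook2 cols c r)
    (fun rc => (PySem.List.pyRange 0 k 1).map (fun i => pvGet2 g (rc.1 + i) rc.2)) k

-- port of _best_135
def pvBest135 (k : Int) (g : List (List Int)) : Int × List Int :=
  let n : Int := (g.length : Int)
  let anti := (PySem.List.pyRange 0 (2 * n - 1) 1).map (fun s =>
    pvWinProds ((PySem.List.pyRange (max 0 (s - n + 1)) (min n (s + 1)) 1).map
      (fun j => pvGet2 g j (s - j))) k)
  pvBest ((PySem.List.pyRange 0 (n - k + 1) 1).flatMap (fun r =>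
      (PySem.List.pyRange (k - 1) (n - k + 1) 1).map (fun c => (r, c))))
    (fun r c => pvLook2 anti (r + c) (r - max 0 (r + c - (g.length : Int) + 1)))
    (fun rc => (PySem.List.pyRange 0 k 1).map (fun i => pvGet2 g (rc.1 + i) (rc.2 - i))) k

def finding_the_x_highest_adjacent_number_alt (number : Int) (grid_array : List (List Int)) : List Int :=
  if (grid_array.length : Int) - number + 1 ≤ 0 then List.replicate number.toNat 1
  else
    let b0 := pvBest0 number grid_array
    let b45 := pvBest45 number grid_array
    let b90 := pvBest90 number grid_array
    let b135 := pvBest135 number grid_array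
    let m := max (max (max b0.1 b45.1) b90.1) b135.1
    if b0.1 = m then b0.2
    else if b45.1 = m then b45.2
    else if b90.1 = m then b90.2
    else if b135.1 = m then b135.2
    else []

-- ===== PRECONDITION & SPEC =====
-- Pre_ admits exactly the inputs on which Python A returns: number ≥ 1 (otherwise reduce() of the
-- empty running best raises TypeError) and, whenever the scan loops run at all (number ≤ len),
-- every row at least as long as the grid (A indexes columns 0..len-1, shorter rows raise IndexError).
def Pre_finding_the_x_highest_adjacent_number (number : Int) (grid_array : List (List Int)) : Prop :=
  1 ≤ number ∧ (number ≤ (grid_array.length : Int) →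
    ∀ row ∈ grid_array, grid_array.length ≤ row.length)
instance (number : Int) (grid_array : List (List Int)) : Decidable (Pre_finding_the_x_highest_adjacent_number number grid_array) := by unfold Pre_finding_the_x_highest_adjacent_number; infer_instance

def pvWitness_finding_the_x_highest_adjacent_number : Int × List (List Int) := (2, [[1, 2], [3, 4]])

def Spec_finding_the_x_highest_adjacent_number (number : Int) (grid_array : List (List Int)) (out : List Int) : Prop := out = finding_the_x_highest_adjacent_number_alt number grid_array
instance (number : Int) (grid_array : List (List Int)) (out : List Int) : Decidable (Spec_finding_the_x_highest_adjacent_number number grid_array out) := by unfold Spec_finding_the_x_highest_adjacent_number; infer_instance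

-- ===== CLAIM (what is proved, stated in full; the proofs are below) =====
def Claim_equal_finding_the_x_highest_adjacent_number : Prop := ∀ (number : Int) (grid_array : List (List Int)), Dom_finding_the_x_highest_adjacent_number number grid_array → Pre_finding_the_x_highest_adjacent_number number grid_array → Spec_finding_the_x_highest_adjacent_number number grid_array (finding_the_x_highest_adjacent_number number grid_array)

-- ===== LEMMAS AND PROOFS =====

-- the running-best update both programs boil down to
def pvProd (xs : List Int) : Int := xs.foldl (· * ·) 1
def pvStepW (cur w : List Int) : List Int := if pvProd cur < pvProd w then w else cur
def pvRecon (base : List Int) (wnd : Int × Int → List Int) (o : Option (Int × Int)) : List Int :=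
  match o with | none => base | some rc => wnd rc

-- k-window starting at s, read with getD
def pvWin (v : List Int) (s kk : Nat) : List Int :=
  (List.range kk).map (fun i => v.getD (s + i) 0)

-- product of the nonzero entries
def pvNZ (l : List Int) : Int := pvProd (l.filter (fun x => x ≠ 0))

theorem pvProd_eq_prod (l : List Int) : pvProd l = l.prod := by
  rw [List.prod_eq_foldl]; rfl

theorem pvReduceMul_eq_prod (xs : List Int) : pvReduceMul xs = pvProd xs := by
  cases xs with
  | nil => rfl
  | cons h t => simp [pvReduceMul, pvProd]

theorem pvFoldMul_eq_prod_map (rng : List Int) (e : Int → Int) :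
    rng.foldl (fun a i => a * e i) 1 = pvProd (rng.map e) := by
  simp [pvProd, List.foldl_map]

-- A's nested best-tracking loops are the running-best fold over the direction's window list
theorem pvNested_eq (rs cs rng : List Int) (e : Int → Int → Int → Int) (init : List Int) :
    rs.foldl (fun cur r => cs.foldl (fun cur c =>
        if (rng.foldl (fun a i => a * e r c i) 1) > pvReduceMul cur then
          rng.map (fun i => e r c i)
        else cur) cur) init
      = List.foldl pvStepW init (rs.flatMap (fun r => cs.map (fun c => rng.map (fun i => e r c i)))) := by
  simp only [List.foldl_flatMap, List.foldl_map, pvStepW, pvFoldMul_eq_prod_map,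
    pvReduceMul_eq_prod, gt_iff_lt]

theorem pvBase_eq (number : Int) :
    (PySem.List.pyRange 0 number 1).map (fun _ => (1 : Int)) =
      List.replicate number.toNat (1 : Int) := by
  rw [List.map_const', PySem.List.length_pyRange_one]
  norm_num

theorem pvProd_replicate_one (m : Nat) : pvProd (List.replicate m 1) = 1 := by
  simp [pvProd_eq_prod]

-- pvProd in terms of the zero count and the nonzero product
theorem pvProd_char (l : List Int) :
    pvProd l = if l.count 0 = 0 then pvNZ l else 0 := by
  by_cases h : l.count 0 = 0
  · rw [if_pos h]
    unfold pvNZ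
    congr 1
    rw [List.count_eq_zero] at h
    symm
    rw [List.filter_eq_self]
    intro a ha
    simp only [ne_eq, decide_eq_true_eq]
    exact fun hz => h (hz ▸ ha)
  · rw [if_neg h, pvProd_eq_prod]
    exact List.prod_eq_zero (by rwa [← List.count_pos_iff, Nat.pos_iff_ne_zero])

theorem pvNZ_append_singleton (l : List Int) (x : Int) :
    pvNZ (l ++ [x]) = if x = 0 then pvNZ l else pvNZ l * x := by
  by_cases h : x = 0 <;> simp [pvNZ, List.filter_append, h, pvProd_eq_prod]

theorem pvNZ_cons (y : Int) (l : List Int) :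
    pvNZ (y :: l) = if y = 0 then pvNZ l else y * pvNZ l := by
  by_cases h : y = 0 <;> simp [pvNZ, h, pvProd_eq_prod]

-- a fully contained window read from the prefix
theorem pvWin_prefix (pre suf : List Int) (s kk : Nat) (h : s + kk ≤ pre.length) :
    (pre.drop s).take kk = pvWin (pre ++ suf) s kk := by
  apply List.ext_getElem
  · simp [pvWin]; omega
  · intro i h1 h2
    simp only [pvWin, List.getElem_take, List.getElem_drop]
    have hlt : s + i < pre.length := by simp at h1; omega
    rw [List.getElem_map, List.getElem_range,
      List.getD_eq_getElem _ _ (by simp; omega),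
      List.getElem_append_left hlt]

-- the sliding-window loop invariant: after a prefix, the state is the zero count,
-- nonzero product and finished window products of that prefix
theorem pvWPLoop_spec (kk : Nat) (hk1 : 1 ≤ kk) (values : List Int) :
    ∀ (suf pre : List Int), values = pre ++ suf →
      pvWPLoop values (kk : Int) suf (pre.length : Int)
        ((List.range (pre.length + 1 - kk)).map (fun s => pvProd (pvWin values s kk)))
        (((pre.drop (pre.length - kk)).count 0 : Nat) : Int)
        (pvNZ (pre.drop (pre.length - kk)))
      = (List.range (values.length + 1 - kk)).map (fun s => pvProd (pvWin values s kk)) := by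
  intro suf
  induction suf with
  | nil =>
    intro pre hv
    simp only [pvWPLoop]
    rw [hv, List.append_nil]
  | cons x suf' ih =>
    intro pre hv
    have hv' : values = (pre ++ [x]) ++ suf' := by rw [hv]; simp
    have hlenx : (pre ++ [x]).length = pre.length + 1 := by simp
    set j := pre.length with hj
    have hW' : (pre ++ [x]).drop (j + 1 - kk) = pre.drop (j + 1 - kk) ++ [x] := by
      exact List.drop_append_of_le_length (by omega)
    rw [pvWPLoop]
    by_cases hkj : kk ≤ j
    · -- removal step
      have hidx : j - kk < pre.length := by omega
      have hcast : (j : Int) - (kk : Int) = ((j - kk : Nat) : Int) := by omega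
      have hy : PySem.List.pyGetD values ((j : Int) - (kk : Int)) 0 = pre[j - kk] := by
        rw [hcast, PySem.List.pyGetD_natCast, hv,
          List.getD_eq_getElem _ _ (by simp; omega), List.getElem_append_left hidx]
      set y := pre[j - kk] with hy'
      have hdropW : pre.drop (j - kk) = y :: pre.drop (j + 1 - kk) := by
        rw [show j + 1 - kk = (j - kk) + 1 by omega]
        exact List.drop_eq_getElem_cons hidx
      have hcond : ((kk : Int) ≤ (j : Int)) := by exact_mod_cast hkj
      have hcond1 : ((kk : Int) - 1 ≤ (j : Int)) := by omega
      rw [if_pos hcond, if_pos hcond, if_pos hcond1, hy]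
      have hcount : ∀ (l : List Int) (z : Int), (l ++ [z]).count 0 = l.count 0 + (if z = 0 then 1 else 0) := by
        intro l z
        by_cases hz : z = 0 <;> simp [List.count_append, hz]
      have hzeros2 :
          (if y = 0 then (if x = 0 then ((((pre.drop (j - kk)).count 0 : Nat) : Int) + 1) else (((pre.drop (j - kk)).count 0 : Nat) : Int)) - 1
           else (if x = 0 then ((((pre.drop (j - kk)).count 0 : Nat) : Int) + 1) else (((pre.drop (j - kk)).count 0 : Nat) : Int)))
          = ((((pre ++ [x]).drop (j + 1 - kk)).count 0 : Nat) : Int) := by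
        rw [hW', hcount, hdropW]
        by_cases hyz : y = 0 <;> by_cases hxz : x = 0 <;>
          simp [hyz, hxz]
      have hnzp2 :
          (if y = 0 then (if x = 0 then pvNZ (pre.drop (j - kk)) else pvNZ (pre.drop (j - kk)) * x)
           else PySem.Int.floordiv (if x = 0 then pvNZ (pre.drop (j - kk)) else pvNZ (pre.drop (j - kk)) * x) y)
          = pvNZ ((pre ++ [x]).drop (j + 1 - kk)) := by
        have hx1 : (if x = 0 then pvNZ (pre.drop (j - kk)) else pvNZ (pre.drop (j - kk)) * x)
            = pvNZ (pre.drop (j - kk) ++ [x]) := (pvNZ_append_singleton _ _).symm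
        rw [hx1, hW']
        have hco : pre.drop (j - kk) ++ [x] = y :: (pre.drop (j + 1 - kk) ++ [x]) := by
          rw [hdropW]; rfl
        rw [hco, pvNZ_cons]
        by_cases hyz : y = 0
        · rw [if_pos hyz, if_pos hyz]
        · rw [if_neg hyz, if_neg hyz]
          show Int.fdiv _ _ = _
          exact Int.mul_fdiv_cancel_left _ hyz
      rw [hzeros2, hnzp2]
      have hentry :
          (if ((((pre ++ [x]).drop (j + 1 - kk)).count 0 : Nat) : Int) = 0
             then pvNZ ((pre ++ [x]).drop (j + 1 - kk)) else 0)
          = pvProd (pvWin values (j + 1 - kk) kk) := by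
        have hwin : (pre ++ [x]).drop (j + 1 - kk) = pvWin values (j + 1 - kk) kk := by
          have hwp := pvWin_prefix (pre ++ [x]) suf' (j + 1 - kk) kk (by simp; omega)
          rw [← hv'] at hwp
          rw [← hwp, List.take_of_length_le (by simp; omega)]
        rw [hwin, pvProd_char (pvWin values (j + 1 - kk) kk)]
        by_cases hc : (pvWin values (j + 1 - kk) kk).count 0 = 0 <;> simp [hc]
      rw [hentry]
      have hout : (List.range (j + 1 - kk)).map (fun s => pvProd (pvWin values s kk))
            ++ [pvProd (pvWin values (j + 1 - kk) kk)]
          = (List.range (j + 1 + 1 - kk)).map (fun s => pvProd (pvWin values s kk)) := by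
        rw [show j + 1 + 1 - kk = (j + 1 - kk) + 1 by omega, List.range_succ]
        simp
      rw [hout]
      have hih := ih (pre ++ [x]) hv'
      rw [hlenx] at hih
      rw [show ((j : Int) + 1) = ((j + 1 : Nat) : Int) by push_cast; ring]
      exact hih
    · -- no removal yet: the window is the whole prefix
      have hcond : ¬ ((kk : Int) ≤ (j : Int)) := by exact_mod_cast hkj
      rw [if_neg hcond, if_neg hcond]
      have hdrop0 : pre.drop (j - kk) = pre := by rw [show j - kk = 0 by omega]; rfl
      have hdrop0' : (pre ++ [x]).drop (j + 1 - kk) = pre ++ [x] := by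
        rw [show j + 1 - kk = 0 by omega]; rfl
      have hzeros1 : (if x = 0 then (((pre.drop (j - kk)).count 0 : Nat) : Int) + 1
            else (((pre.drop (j - kk)).count 0 : Nat) : Int))
          = ((((pre ++ [x]).drop (j + 1 - kk)).count 0 : Nat) : Int) := by
        rw [hdrop0, hdrop0']
        by_cases hxz : x = 0 <;> simp [List.count_append, hxz]
      have hnzp1 : (if x = 0 then pvNZ (pre.drop (j - kk)) else pvNZ (pre.drop (j - kk)) * x)
          = pvNZ ((pre ++ [x]).drop (j + 1 - kk)) := by
        rw [hdrop0, hdrop0', pvNZ_append_singleton]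
      rw [hzeros1, hnzp1]
      by_cases hfin : kk = j + 1
      · -- the first window just completed
        have hcond1 : ((kk : Int) - 1 ≤ (j : Int)) := by omega
        rw [if_pos hcond1]
        have hentry :
            (if ((((pre ++ [x]).drop (j + 1 - kk)).count 0 : Nat) : Int) = 0
               then pvNZ ((pre ++ [x]).drop (j + 1 - kk)) else 0)
            = pvProd (pvWin values 0 kk) := by
          have hwin : (pre ++ [x]).drop (j + 1 - kk) = pvWin values 0 kk := by
            have hwp := pvWin_prefix (pre ++ [x]) suf' 0 kk (by simp; omega)
            rw [← hv'] at hwp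
            rw [hdrop0', ← hwp, List.take_of_length_le (by simp; omega)]
            simp
          rw [hwin, pvProd_char (pvWin values 0 kk)]
          by_cases hc : (pvWin values 0 kk).count 0 = 0 <;> simp [hc]
        rw [hentry]
        have hout : (List.range (j + 1 - kk)).map (fun s => pvProd (pvWin values s kk))
              ++ [pvProd (pvWin values 0 kk)]
            = (List.range (j + 1 + 1 - kk)).map (fun s => pvProd (pvWin values s kk)) := by
          rw [show j + 1 - kk = 0 by omega, show j + 1 + 1 - kk = 1 by omega]
          simp
        rw [hout]
        have hih := ih (pre ++ [x]) hv'
        rw [hlenx] at hih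
        rw [show ((j : Int) + 1) = ((j + 1 : Nat) : Int) by push_cast; ring]
        exact hih
      · -- still filling the first window
        have hcond1 : ¬ ((kk : Int) - 1 ≤ (j : Int)) := by
          have hlt : j + 1 < kk := by omega
          omega
        rw [if_neg hcond1]
        have hout : (List.range (j + 1 - kk)).map (fun s => pvProd (pvWin values s kk))
            = (List.range (j + 1 + 1 - kk)).map (fun s => pvProd (pvWin values s kk)) := by
          rw [show j + 1 - kk = 0 by omega, show j + 1 + 1 - kk = 0 by omega]
        rw [hout]
        have hih := ih (pre ++ [x]) hv'
        rw [hlenx] at hih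
        rw [show ((j : Int) + 1) = ((j + 1 : Nat) : Int) by push_cast; ring]
        exact hih

theorem pvWinProds_spec (kk : Nat) (hk1 : 1 ≤ kk) (v : List Int) :
    pvWinProds v (kk : Int) =
      (List.range (v.length + 1 - kk)).map (fun s => pvProd (pvWin v s kk)) := by
  have h := pvWPLoop_spec kk hk1 v v [] rfl
  simpa [pvWinProds, pvNZ, pvProd, Nat.sub_eq_zero_of_le hk1] using h

-- table lookup = product of the corresponding window
theorem pvTable_lookup (kk : Nat) (hk1 : 1 ≤ kk) (line : List Int) (off : Nat)
    (hoff : off + kk ≤ line.length) :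
    PySem.List.pyGetD (pvWinProds line (kk : Int)) ((off : Nat) : Int) 0
      = pvProd (pvWin line off kk) := by
  rw [pvWinProds_spec kk hk1, PySem.List.pyGetD_natCast,
    PySem.List.getD_map_range _ _ _ _ (by omega)]

-- a window is the Python comprehension over range(k)
theorem pvWin_eq_map (line : List Int) (e : Int → Int) (off kk : Nat)
    (he : ∀ i : Nat, i < kk → line.getD (off + i) 0 = e (i : Int)) :
    pvWin line off kk = (PySem.List.pyRange 0 (kk : Int) 1).map e := by
  rw [PySem.List.pyRange_one, List.map_map]
  simp only [Int.sub_zero, Int.toNat_natCast]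
  unfold pvWin
  apply List.map_congr_left
  intro i hi
  rw [List.mem_range] at hi
  simpa using he i hi

-- the best-window scan tracks the running-best fold over the same windows
theorem pvBest_loop (P : Int → Int → Int) (wnd : Int × Int → List Int) (base : List Int) :
    ∀ (ps : List (Int × Int)) (bp : Int) (bpos : Option (Int × Int)),
      (∀ p ∈ ps, P p.1 p.2 = pvProd (wnd p)) →
      bp = pvProd (pvRecon base wnd bpos) →
      (List.foldl pvStepW (pvRecon base wnd bpos) (ps.map wnd)
          = pvRecon base wnd (ps.foldl (fun acc rc => if acc.1 < P rc.1 rc.2 then (P rc.1 rc.2, some rc) else acc) (bp, bpos)).2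
        ∧ (ps.foldl (fun acc rc => if acc.1 < P rc.1 rc.2 then (P rc.1 rc.2, some rc) else acc) (bp, bpos)).1
          = pvProd (pvRecon base wnd (ps.foldl (fun acc rc => if acc.1 < P rc.1 rc.2 then (P rc.1 rc.2, some rc) else acc) (bp, bpos)).2)) := by
  intro ps
  induction ps with
  | nil => intro bp bpos _ hbp; exact ⟨rfl, hbp⟩
  | cons q t ih =>
    intro bp bpos hP hbp
    simp only [List.map_cons, List.foldl_cons]
    have hq : P q.1 q.2 = pvProd (wnd q) := hP q (List.mem_cons_self ..)
    have ht : ∀ p ∈ t, P p.1 p.2 = pvProd (wnd p) := fun p hp => hP p (List.mem_cons_of_mem _ hp)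
    by_cases hlt : bp < P q.1 q.2
    · rw [if_pos hlt]
      have hstep : pvStepW (pvRecon base wnd bpos) (wnd q) = wnd q := by
        unfold pvStepW
        rw [if_pos (by rw [← hbp, ← hq]; exact hlt)]
      rw [hstep]
      have hih := ih (P q.1 q.2) (some q) ht (by simpa [pvRecon] using hq)
      simpa [pvRecon] using hih
    · rw [if_neg hlt]
      have hstep : pvStepW (pvRecon base wnd bpos) (wnd q) = pvRecon base wnd bpos := by
        unfold pvStepW
        rw [if_neg (by rw [← hbp, ← hq]; exact hlt)]
      rw [hstep]
      exact ih bp bpos ht hbp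

theorem pvBest_spec (ps : List (Int × Int)) (P : Int → Int → Int)
    (wnd : Int × Int → List Int) (k : Int)
    (hP : ∀ p ∈ ps, P p.1 p.2 = pvProd (wnd p)) :
    (pvBest ps P wnd k).2
        = List.foldl pvStepW (List.replicate k.toNat 1) (ps.map wnd)
      ∧ (pvBest ps P wnd k).1 = pvProd (pvBest ps P wnd k).2 := by
  have h := pvBest_loop P wnd (List.replicate k.toNat 1) ps 1 none hP
    (by simp [pvRecon, pvProd_replicate_one])
  exact ⟨h.1.symm, h.2⟩

-- windows of a direction = window map over its position list
theorem pvFlatMap_map (rs cs : List Int) (wnd : Int × Int → List Int) :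
    rs.flatMap (fun r => cs.map (fun c => wnd (r, c)))
      = (rs.flatMap (fun r => cs.map (fun c => (r, c)))).map wnd := by
  simp [List.map_flatMap, Function.comp_def]

theorem pvLine_getD (f : Int → Int) (a b : Int) (idx : Nat) (h : idx < (b - a).toNat) :
    ((PySem.List.pyRange a b 1).map f).getD idx 0 = f (a + (idx : Int)) := by
  rw [PySem.List.pyRange_one, List.map_map, PySem.List.getD_map_range _ _ _ _ h]
  rfl

theorem pvRowAt (g : List (List Int)) (r : Int) (h0 : 0 ≤ r) (h1 : r < (g.length : Int)) :
    PySem.List.pyGetD g r [] ∈ g := by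
  rw [show r = ((r.toNat : Nat) : Int) by omega, PySem.List.pyGetD_natCast,
    List.getD_eq_getElem _ _ (by omega)]
  exact List.getElem_mem _

theorem pvDirEq0 (k : Int) (g : List (List Int)) (hk : 1 ≤ k) (hkn : k ≤ (g.length : Int))
    (hrows : ∀ row ∈ g, (g.length : Nat) ≤ row.length) :
    pvDir0 k g = (pvBest0 k g).2 ∧ (pvBest0 k g).1 = pvProd (pvBest0 k g).2 := by
  have hkc : k = ((k.toNat : Nat) : Int) := by omega
  have hP : ∀ rc ∈ ((PySem.List.pyRange 0 (g.length : Int) 1).flatMap (fun r =>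
        (PySem.List.pyRange 0 ((g.length : Int) - k + 1) 1).map (fun c => (r, c)))),
      (fun r c => pvLook2 ((PySem.List.pyRange 0 (g.length : Int) 1).map (fun r =>
          pvWinProds (PySem.List.slice (PySem.List.pyGetD g r []) none (some (g.length : Int))) k)) r c) rc.1 rc.2
      = pvProd ((PySem.List.pyRange 0 k 1).map (fun i => pvGet2 g rc.1 (rc.2 + i))) := by
    intro rc hm
    rw [List.mem_flatMap] at hm
    obtain ⟨r, hr, hmm⟩ := hm
    rw [List.mem_map] at hmm
    obtain ⟨c, hc, rfl⟩ := hmm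
    rw [PySem.List.mem_pyRange_one] at hr hc
    dsimp only
    unfold pvLook2
    rw [PySem.List.pyGetD_map_pyRange_of_nonneg _ _ _ _ hr.1 hr.2]
    have hrlen : (g.length : Nat) ≤ (PySem.List.pyGetD g r []).length :=
      hrows _ (pvRowAt g r hr.1 hr.2)
    rw [PySem.List.slice_to _ (Int.natCast_nonneg _)]
    set row := PySem.List.pyGetD g r [] with hrow
    have hlin : (row.take (g.length : Int).toNat).length = g.length := by
      simp; omega
    rw [hkc, show c = ((c.toNat : Nat) : Int) by omega,
      pvTable_lookup k.toNat (by omega) _ c.toNat (by rw [hlin]; omega)]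
    congr 1
    apply pvWin_eq_map
    intro i hi
    have hidx : c.toNat + i < row.length := by omega
    rw [List.getD_eq_getElem _ _ (by rw [hlin]; omega), List.getElem_take]
    show _ = PySem.List.pyGetD row _ 0
    rw [show ((c.toNat : Nat) : Int) + (i : Int) = ((c.toNat + i : Nat) : Int) by omega,
      PySem.List.pyGetD_natCast, List.getD_eq_getElem _ _ hidx]
  have hspec := pvBest_spec _ _ _ k hP
  have h1 := hspec.1
  rw [← pvFlatMap_map] at h1
  simp only [] at h1
  constructor
  · rw [pvDir0, pvNested_eq, pvBase_eq]
    exact h1.symm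
  · exact hspec.2

theorem pvTable_lookup' (kk : Nat) (hk1 : 1 ≤ kk) (line : List Int) (off : Int)
    (h0 : 0 ≤ off) (hoff : off.toNat + kk ≤ line.length) :
    PySem.List.pyGetD (pvWinProds line (kk : Int)) off 0 = pvProd (pvWin line off.toNat kk) := by
  rw [show off = ((off.toNat : Nat) : Int) by omega]
  exact pvTable_lookup kk hk1 line off.toNat hoff

theorem pvDirEq90 (k : Int) (g : List (List Int)) (hk : 1 ≤ k) (hkn : k ≤ (g.length : Int)) :
    pvDir90 k g = (pvBest90 k g).2 ∧ (pvBest90 k g).1 = pvProd (pvBest90 k g).2 := by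
  have hkc : k = ((k.toNat : Nat) : Int) := by omega
  have hP : ∀ rc ∈ ((PySem.List.pyRange 0 ((g.length : Int) - k + 1) 1).flatMap (fun r =>
        (PySem.List.pyRange 0 (g.length : Int) 1).map (fun c => (r, c)))),
      (fun r c => pvLook2 ((PySem.List.pyRange 0 (g.length : Int) 1).map (fun c =>
          pvWinProds ((PySem.List.pyRange 0 (g.length : Int) 1).map (fun r => pvGet2 g r c)) k)) c r) rc.1 rc.2
      = pvProd ((PySem.List.pyRange 0 k 1).map (fun i => pvGet2 g (rc.1 + i) rc.2)) := by
    intro rc hm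
    rw [List.mem_flatMap] at hm
    obtain ⟨r, hr, hmm⟩ := hm
    rw [List.mem_map] at hmm
    obtain ⟨c, hc, rfl⟩ := hmm
    rw [PySem.List.mem_pyRange_one] at hr hc
    dsimp only
    unfold pvLook2
    rw [PySem.List.pyGetD_map_pyRange_of_nonneg _ _ _ _ hc.1 hc.2]
    have hlin : ((PySem.List.pyRange 0 (g.length : Int) 1).map (fun r => pvGet2 g r c)).length
        = (g.length : Nat) := by
      rw [List.length_map, PySem.List.length_pyRange_one]; omega
    rw [hkc, pvTable_lookup' k.toNat (by omega) _ r hr.1 (by rw [hlin]; omega)]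
    congr 1
    apply pvWin_eq_map
    intro i hi
    rw [pvLine_getD _ 0 (g.length : Int) (r.toNat + i) (by omega)]
    rw [show (0 : Int) + ((r.toNat + i : Nat) : Int) = r + (i : Int) by omega]
  have hspec := pvBest_spec _
    (fun r c => pvLook2 ((PySem.List.pyRange 0 (g.length : Int) 1).map (fun c =>
      pvWinProds ((PySem.List.pyRange 0 (g.length : Int) 1).map (fun r => pvGet2 g r c)) k)) c r)
    (fun rc => (PySem.List.pyRange 0 k 1).map (fun i => pvGet2 g (rc.1 + i) rc.2)) k hP
  have h1 := hspec.1
  rw [← pvFlatMap_map] at h1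
  simp only [] at h1
  constructor
  · rw [pvDir90, pvNested_eq, pvBase_eq]
    exact h1.symm
  · exact hspec.2

theorem pvDirEq45 (k : Int) (g : List (List Int)) (hk : 1 ≤ k) (hkn : k ≤ (g.length : Int)) :
    pvDir45 k g = (pvBest45 k g).2 ∧ (pvBest45 k g).1 = pvProd (pvBest45 k g).2 := by
  have hkc : k = ((k.toNat : Nat) : Int) := by omega
  have hP : ∀ rc ∈ ((PySem.List.pyRange 0 ((g.length : Int) - k + 1) 1).flatMap (fun r =>
        (PySem.List.pyRange 0 ((g.length : Int) - k + 1) 1).map (fun c => (r, c)))),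
      (fun r c => if r ≤ c then
          pvLook2 ((PySem.List.pyRange 0 (g.length : Int) 1).map (fun t =>
            pvWinProds ((PySem.List.pyRange 0 ((g.length : Int) - t) 1).map (fun i => pvGet2 g i (i + t))) k)) (c - r) r
        else
          pvLook2 ((PySem.List.pyRange 0 (g.length : Int) 1).map (fun t =>
            pvWinProds ((PySem.List.pyRange t (g.length : Int) 1).map (fun j => pvGet2 g j (j - t))) k)) (r - c) c) rc.1 rc.2
      = pvProd ((PySem.List.pyRange 0 k 1).map (fun i => pvGet2 g (rc.1 + i) (rc.2 + i))) := by
    intro rc hm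
    rw [List.mem_flatMap] at hm
    obtain ⟨r, hr, hmm⟩ := hm
    rw [List.mem_map] at hmm
    obtain ⟨c, hc, rfl⟩ := hmm
    rw [PySem.List.mem_pyRange_one] at hr hc
    dsimp only
    by_cases hrc : r ≤ c
    · rw [if_pos hrc]
      unfold pvLook2
      rw [PySem.List.pyGetD_map_pyRange_of_nonneg _ _ _ _ (by omega) (by omega)]
      have hlin : ((PySem.List.pyRange 0 ((g.length : Int) - (c - r)) 1).map
          (fun i => pvGet2 g i (i + (c - r)))).length = ((g.length : Int) - (c - r)).toNat := by
        rw [List.length_map, PySem.List.length_pyRange_one]; omega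
      rw [hkc, pvTable_lookup' k.toNat (by omega) _ r hr.1 (by rw [hlin]; omega)]
      congr 1
      apply pvWin_eq_map
      intro i hi
      rw [pvLine_getD _ 0 ((g.length : Int) - (c - r)) (r.toNat + i) (by omega)]
      rw [show (0 : Int) + ((r.toNat + i : Nat) : Int) = r + (i : Int) by omega]
      rw [show r + (i : Int) + (c - r) = c + (i : Int) by ring]
    · rw [if_neg hrc]
      unfold pvLook2
      rw [PySem.List.pyGetD_map_pyRange_of_nonneg _ _ _ _ (by omega) (by omega)]
      have hlin : ((PySem.List.pyRange (r - c) (g.length : Int) 1).map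
          (fun j => pvGet2 g j (j - (r - c)))).length = ((g.length : Int) - (r - c)).toNat := by
        rw [List.length_map, PySem.List.length_pyRange_one]
      rw [hkc, pvTable_lookup' k.toNat (by omega) _ c hc.1 (by rw [hlin]; omega)]
      congr 1
      apply pvWin_eq_map
      intro i hi
      rw [pvLine_getD _ (r - c) (g.length : Int) (c.toNat + i) (by omega)]
      rw [show r - c + ((c.toNat + i : Nat) : Int) = r + (i : Int) by omega]
      rw [show r + (i : Int) - (r - c) = c + (i : Int) by omega]
  have hspec := pvBest_spec _
    (fun r c => if r ≤ c then
        pvLook2 ((PySem.List.pyRange 0 (g.length : Int) 1).map (fun t =>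
          pvWinProds ((PySem.List.pyRange 0 ((g.length : Int) - t) 1).map (fun i => pvGet2 g i (i + t))) k)) (c - r) r
      else
        pvLook2 ((PySem.List.pyRange 0 (g.length : Int) 1).map (fun t =>
          pvWinProds ((PySem.List.pyRange t (g.length : Int) 1).map (fun j => pvGet2 g j (j - t))) k)) (r - c) c)
    (fun rc => (PySem.List.pyRange 0 k 1).map (fun i => pvGet2 g (rc.1 + i) (rc.2 + i))) k hP
  have h1 := hspec.1
  rw [← pvFlatMap_map] at h1
  simp only [] at h1
  constructor
  · rw [pvDir45, pvNested_eq, pvBase_eq]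
    exact h1.symm
  · exact hspec.2

theorem pvDirEq135 (k : Int) (g : List (List Int)) (hk : 1 ≤ k) (hkn : k ≤ (g.length : Int)) :
    pvDir135 k g = (pvBest135 k g).2 ∧ (pvBest135 k g).1 = pvProd (pvBest135 k g).2 := by
  have hkc : k = ((k.toNat : Nat) : Int) := by omega
  have hP : ∀ rc ∈ ((PySem.List.pyRange 0 ((g.length : Int) - k + 1) 1).flatMap (fun r =>
        (PySem.List.pyRange (k - 1) ((g.length : Int) - k + 1) 1).map (fun c => (r, c)))),
      (fun r c => pvLook2 ((PySem.List.pyRange 0 (2 * (g.length : Int) - 1) 1).map (fun s =>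
          pvWinProds ((PySem.List.pyRange (max 0 (s - (g.length : Int) + 1)) (min (g.length : Int) (s + 1)) 1).map
            (fun j => pvGet2 g j (s - j))) k)) (r + c) (r - max 0 (r + c - (g.length : Int) + 1))) rc.1 rc.2
      = pvProd ((PySem.List.pyRange 0 k 1).map (fun i => pvGet2 g (rc.1 + i) (rc.2 - i))) := by
    intro rc hm
    rw [List.mem_flatMap] at hm
    obtain ⟨r, hr, hmm⟩ := hm
    rw [List.mem_map] at hmm
    obtain ⟨c, hc, rfl⟩ := hmm
    rw [PySem.List.mem_pyRange_one] at hr hc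
    dsimp only
    unfold pvLook2
    rw [PySem.List.pyGetD_map_pyRange_of_nonneg _ _ _ _ (by omega) (by omega)]
    have hlin : ((PySem.List.pyRange (max 0 (r + c - (g.length : Int) + 1)) (min (g.length : Int) (r + c + 1)) 1).map
        (fun j => pvGet2 g j (r + c - j))).length
        = (min (g.length : Int) (r + c + 1) - max 0 (r + c - (g.length : Int) + 1)).toNat := by
      rw [List.length_map, PySem.List.length_pyRange_one]
    rw [hkc, pvTable_lookup' k.toNat (by omega) _ (r - max 0 (r + c - (g.length : Int) + 1))
      (by omega) (by rw [hlin]; omega)]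
    congr 1
    apply pvWin_eq_map
    intro i hi
    rw [pvLine_getD _ (max 0 (r + c - (g.length : Int) + 1)) (min (g.length : Int) (r + c + 1))
      ((r - max 0 (r + c - (g.length : Int) + 1)).toNat + i) (by omega)]
    rw [show max 0 (r + c - (g.length : Int) + 1)
        + (((r - max 0 (r + c - (g.length : Int) + 1)).toNat + i : Nat) : Int)
        = r + (i : Int) by omega]
    rw [show r + c - (r + (i : Int)) = c - (i : Int) by ring]
  have hspec := pvBest_spec _
    (fun r c => pvLook2 ((PySem.List.pyRange 0 (2 * (g.length : Int) - 1) 1).map (fun s =>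
        pvWinProds ((PySem.List.pyRange (max 0 (s - (g.length : Int) + 1)) (min (g.length : Int) (s + 1)) 1).map
          (fun j => pvGet2 g j (s - j))) k)) (r + c) (r - max 0 (r + c - (g.length : Int) + 1)))
    (fun rc => (PySem.List.pyRange 0 k 1).map (fun i => pvGet2 g (rc.1 + i) (rc.2 - i))) k hP
  have h1 := hspec.1
  rw [← pvFlatMap_map] at h1
  simp only [] at h1
  constructor
  · rw [pvDir135, pvNested_eq, pvBase_eq]
    exact h1.symm
  · exact hspec.2

theorem pvFlatMapNil {alpha beta : Type} (l : List alpha) :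
    l.flatMap (fun _ => ([] : List beta)) = [] := by
  simp

-- when no window fits, every direction keeps the all-ones baseline
theorem pvDegenerate (k : Int) (g : List (List Int)) (hkn : (g.length : Int) < k) :
    finding_the_x_highest_adjacent_number k g = List.replicate k.toNat 1 := by
  have hnil : PySem.List.pyRange 0 ((g.length : Int) - k + 1) 1 = [] :=
    PySem.List.pyRange_one_eq_nil (by omega)
  have h0 : pvDir0 k g = List.replicate k.toNat 1 := by
    rw [pvDir0, pvNested_eq, hnil]
    simp only [List.map_nil, List.flatMap_nil, pvFlatMapNil, List.foldl_nil, pvBase_eq]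
  have h90 : pvDir90 k g = List.replicate k.toNat 1 := by
    rw [pvDir90, pvNested_eq, hnil]
    simp only [List.map_nil, List.flatMap_nil, pvFlatMapNil, List.foldl_nil, pvBase_eq]
  have h45 : pvDir45 k g = List.replicate k.toNat 1 := by
    rw [pvDir45, pvNested_eq, hnil]
    simp only [List.map_nil, List.flatMap_nil, pvFlatMapNil, List.foldl_nil, pvBase_eq]
  have h135 : pvDir135 k g = List.replicate k.toNat 1 := by
    rw [pvDir135, pvNested_eq, hnil]
    simp only [List.map_nil, List.flatMap_nil, pvFlatMapNil, List.foldl_nil, pvBase_eq]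
  rw [finding_the_x_highest_adjacent_number]
  simp only [h0, h45, h90, h135]
  simp [pvPick, PySem.List.enumerate, PySem.List.pyGetD_zero_cons]

-- A's pick-the-first-maximum tail equals B's if-chain once the products agree
theorem pvTail (w0 w45 w90 w135 : List Int) (p0 p45 p90 p135 : Int)
    (h0 : p0 = pvProd w0) (h45 : p45 = pvProd w45) (h90 : p90 = pvProd w90)
    (h135 : p135 = pvProd w135) :
    pvPick ([pvReduceMul w45, pvReduceMul w90, pvReduceMul w135].foldl max (pvReduceMul w0))
        [pvReduceMul w0, pvReduceMul w45, pvReduceMul w90, pvReduceMul w135]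
        (PySem.List.enumerate [w0, w45, w90, w135] 0)
      = (if p0 = max (max (max p0 p45) p90) p135 then w0
         else if p45 = max (max (max p0 p45) p90) p135 then w45
         else if p90 = max (max (max p0 p45) p90) p135 then w90
         else if p135 = max (max (max p0 p45) p90) p135 then w135
         else []) := by
  subst h0 h45 h90 h135
  simp only [pvReduceMul_eq_prod, List.foldl_cons, List.foldl_nil]
  simp only [PySem.List.enumerate_cons, PySem.List.enumerate_nil, pvPick]
  norm_num [PySem.List.pyGetD_ofNat', PySem.List.pyGetD_zero_cons]
  split_ifs <;> first | rfl | omega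

theorem pvMainEq (k : Int) (g : List (List Int)) (hk : 1 ≤ k) (hkn : k ≤ (g.length : Int))
    (hrows : ∀ row ∈ g, (g.length : Nat) ≤ row.length) :
    finding_the_x_highest_adjacent_number k g = finding_the_x_highest_adjacent_number_alt k g := by
  obtain ⟨e0, hp0⟩ := pvDirEq0 k g hk hkn hrows
  obtain ⟨e45, hp45⟩ := pvDirEq45 k g hk hkn
  obtain ⟨e90, hp90⟩ := pvDirEq90 k g hk hkn
  obtain ⟨e135, hp135⟩ := pvDirEq135 k g hk hkn
  rw [finding_the_x_highest_adjacent_number, finding_the_x_highest_adjacent_number_alt,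
    if_neg (by omega : ¬ ((g.length : Int) - k + 1 ≤ 0))]
  simp only [e0, e45, e90, e135, List.map_cons, List.map_nil]
  exact pvTail _ _ _ _ _ _ _ _ hp0 hp45 hp90 hp135

-- ===== VERDICT (by name: the statement is the Claim_ definition above) =====
theorem finding_the_x_highest_adjacent_number_spec : Claim_equal_finding_the_x_highest_adjacent_number := by
  intro number grid_array _ hpre
  obtain ⟨hk, himp⟩ := hpre
  show _ = _
  by_cases hkn : number ≤ (grid_array.length : Int)
  · exact pvMainEq number grid_array hk hkn (himp hkn)
  · rw [finding_the_x_highest_adjacent_number_alt, if_pos (by omega)]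
    exact pvDegenerate number grid_array (by omega)
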